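-- pv_equiv track=rewrite | github.com/aobregon2501/pp_lab1_obregon_alex | funciones_parcial.py | mostrar_posicion
-- ===== SOURCE A (Python) =====
-- def mostrar_posicion(lista, campo_a:str, campo_b:str, campo_c:str) -> str:
--     '''
--     Funcion que muestra en pantalla los jugadores con el formato:
--         posicion:
--         nombre_a: dato_a
--         nombre_b: dato_b
--     Recibe como parametro la lista de jugadores, y 3 strings que definen los campos a mostrar(posicion, nombre y porcentaje de tiros de campo)
--     Retorna un string en el formato establecido
--     '''
--     posicion = lista[0][campo_b]
--     texto = "\n{0}:".format(posicion)
--     for jugador in lista: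
--         if posicion == jugador[campo_b]:
--             texto += "\n{0}: {1}".format(jugador[campo_a], jugador[campo_c])
--         else:
--             posicion = jugador[campo_b]
--             texto += "\n\n{0}:\n{1}: {2}".format(posicion, jugador[campo_a], jugador[campo_c])
--     return texto
-- ===== SOURCE B (Python) =====
-- def _linea(jugador, campo_a, campo_c):
--     return "\n{0}: {1}".format(jugador[campo_a], jugador[campo_c])
--
--
-- def _bloque(posicion, miembros, campo_a, campo_c):
--     return "{0}:".format(posicion) + "".join(
--         _linea(j, campo_a, campo_c) for j in miembros)
--
--
-- def mostrar_posicion(lista, campo_a: str, campo_b: str, campo_c: str) -> str: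
--     # Pass 1: group consecutive players by their campo_b value.
--     grupos = []
--     for jugador in lista:
--         pos = jugador[campo_b]
--         if grupos and grupos[-1][0] == pos:
--             grupos[-1][1].append(jugador)
--         else:
--             grupos.append((pos, [jugador]))
--     # Pass 2: render one block per group and join them.
--     return "\n" + "\n\n".join(
--         _bloque(pos, miembros, campo_a, campo_c) for pos, miembros in grupos)
-- ===== Notes on version B (the rewrite author's own statement) =====
-- stated objective: alternative
-- what changed: Replaced A's single stateful loop (previous-position variable and if/else appending to one running string) with a two-pass decomposition: first group consecutive players by position, then render each group as a block and join the blocks with '\n\n'.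
import Mathlib
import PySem

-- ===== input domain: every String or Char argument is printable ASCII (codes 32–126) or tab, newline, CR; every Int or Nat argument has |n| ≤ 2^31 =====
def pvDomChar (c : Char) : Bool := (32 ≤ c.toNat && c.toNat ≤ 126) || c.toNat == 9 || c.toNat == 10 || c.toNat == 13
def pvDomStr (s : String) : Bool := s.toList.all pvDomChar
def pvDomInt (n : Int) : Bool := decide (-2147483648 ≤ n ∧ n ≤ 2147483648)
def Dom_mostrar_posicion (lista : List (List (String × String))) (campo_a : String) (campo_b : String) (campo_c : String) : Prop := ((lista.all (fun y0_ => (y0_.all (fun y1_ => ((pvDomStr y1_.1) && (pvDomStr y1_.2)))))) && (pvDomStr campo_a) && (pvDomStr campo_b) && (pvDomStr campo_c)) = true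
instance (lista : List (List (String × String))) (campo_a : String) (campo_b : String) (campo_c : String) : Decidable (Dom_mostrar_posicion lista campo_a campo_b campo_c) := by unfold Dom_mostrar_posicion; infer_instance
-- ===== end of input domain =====

-- B replaces A's stateful flat loop (previous-position variable + if/else on the running string)
-- by a two-pass decomposition: group consecutive players by position, then render and join the
-- blocks; objective: alternative decomposition, same O(n) cost. Return-value equivalence only.

-- shared primitive: Python's jugador[campo] on a dict given as an association list
-- (first match; the .getD "" default is never reached under Pre_, where the key is present)
def pvLookup (d : List (String × String)) (k : String) : String :=
  (((d.find? (fun p => p.1 == k)).map (fun p => p.2)).getD "")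

-- ===== PORT A =====
-- body of A's for-loop; state = (posicion, texto)
def pasoA (campo_a : String) (campo_b : String) (campo_c : String)
    (st : String × String) (jugador : List (String × String)) : String × String :=
  if st.1 == pvLookup jugador campo_b then
    (st.1, st.2 ++ "\n" ++ pvLookup jugador campo_a ++ ": " ++ pvLookup jugador campo_c)
  else
    (pvLookup jugador campo_b,
      st.2 ++ "\n\n" ++ pvLookup jugador campo_b ++ ":\n"
        ++ pvLookup jugador campo_a ++ ": " ++ pvLookup jugador campo_c)

def mostrar_posicion (lista : List (List (String × String))) (campo_a : String) (campo_b : String) (campo_c : String) : String :=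
  match lista with
  | [] => ""   -- Python: lista[0] raises IndexError here; excluded by Pre_
  | j0 :: _ =>
    (lista.foldl (pasoA campo_a campo_b campo_c)
      (pvLookup j0 campo_b, "\n" ++ pvLookup j0 campo_b ++ ":")).2

-- ===== PORT B =====
-- Source B's _linea
def linea (jugador : List (String × String)) (campo_a : String) (campo_c : String) : String :=
  "\n" ++ pvLookup jugador campo_a ++ ": " ++ pvLookup jugador campo_c

-- Source B's _bloque  ("".join over the members)
def bloque (posicion : String) (miembros : List (List (String × String)))
    (campo_a : String) (campo_c : String) : String :=
  posicion ++ ":" ++ String.join (miembros.map (fun j => linea j campo_a campo_c))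

-- Source B's "\n\n".join
def joinSep (sep : String) : List String → String
  | [] => ""
  | [x] => x
  | x :: xs => x ++ sep ++ joinSep sep xs

-- body of Source B's grouping loop (pass 1): append to the last group or open a new one
def pasoB (campo_b : String) (gs : List (String × List (List (String × String))))
    (jugador : List (String × String)) : List (String × List (List (String × String))) :=
  let pos := pvLookup jugador campo_b
  match gs.getLast? with
  | some (p, ms) =>
    if p == pos then gs.dropLast ++ [(p, ms ++ [jugador])] else gs ++ [(pos, [jugador])]
  | none => [(pos, [jugador])]

def mostrar_posicion_alt (lista : List (List (String × String))) (campo_a : String) (campo_b : String) (campo_c : String) : String :=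
  let grupos := lista.foldl (pasoB campo_b) []
  "\n" ++ joinSep "\n\n" (grupos.map (fun g => bloque g.1 g.2 campo_a campo_c))

-- ===== PRECONDITION & SPEC =====
-- Pre_ excludes the empty list (A raises IndexError at lista[0]) and players missing one of the
-- three field keys (A raises KeyError); exactly the inputs where the Python A raises.
def Pre_mostrar_posicion (lista : List (List (String × String))) (campo_a : String) (campo_b : String) (campo_c : String) : Prop :=
  lista ≠ [] ∧ ∀ j ∈ lista,
    (j.find? (fun p => p.1 == campo_a)).isSome = true ∧
    (j.find? (fun p => p.1 == campo_b)).isSome = true ∧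
    (j.find? (fun p => p.1 == campo_c)).isSome = true
instance (lista : List (List (String × String))) (campo_a : String) (campo_b : String) (campo_c : String) : Decidable (Pre_mostrar_posicion lista campo_a campo_b campo_c) := by unfold Pre_mostrar_posicion; infer_instance

def pvWitness_mostrar_posicion : (List (List (String × String))) × String × String × String :=
  ([[("n", "ana"), ("p", "G"), ("t", "7")], [("n", "bob"), ("p", "C"), ("t", "9")]], "n", "p", "t")

def Spec_mostrar_posicion (lista : List (List (String × String))) (campo_a : String) (campo_b : String) (campo_c : String) (out : String) : Prop := out = mostrar_posicion_alt lista campo_a campo_b campo_c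
instance (lista : List (List (String × String))) (campo_a : String) (campo_b : String) (campo_c : String) (out : String) : Decidable (Spec_mostrar_posicion lista campo_a campo_b campo_c out) := by unfold Spec_mostrar_posicion; infer_instance

-- ===== CLAIM (what is proved, stated in full; the proofs are below) =====
def Claim_equal_mostrar_posicion : Prop := ∀ (lista : List (List (String × String))) (campo_a : String) (campo_b : String) (campo_c : String), Dom_mostrar_posicion lista campo_a campo_b campo_c → Pre_mostrar_posicion lista campo_a campo_b campo_c → Spec_mostrar_posicion lista campo_a campo_b campo_c (mostrar_posicion lista campo_a campo_b campo_c)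


-- ===== LEMMAS AND PROOFS =====

theorem joinSep_singleton (s x : String) : joinSep s [x] = x := rfl

theorem joinSep_cons₂ (s x y : String) (l : List String) :
    joinSep s (x :: y :: l) = x ++ s ++ joinSep s (y :: l) := rfl

theorem joinSep_concat (s x : String) (l : List String) (hl : l ≠ []) :
    joinSep s (l ++ [x]) = joinSep s l ++ s ++ x := by
  induction l with
  | nil => exact absurd rfl hl
  | cons h t ih =>
    cases t with
    | nil => rfl
    | cons h' t' =>
      rw [List.cons_append, List.cons_append, joinSep_cons₂, ← List.cons_append,
        ih (by simp), joinSep_cons₂]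
      simp [String.append_assoc]

theorem joinSep_concat_append (s x u : String) (l : List String) :
    joinSep s (l ++ [x ++ u]) = joinSep s (l ++ [x]) ++ u := by
  cases l with
  | nil => rfl
  | cons h t =>
    rw [joinSep_concat s _ _ (by simp), joinSep_concat s _ _ (by simp)]
    simp [String.append_assoc]

theorem join_concat (l : List String) (x : String) :
    String.join (l ++ [x]) = String.join l ++ x := by
  simp [String.join, List.foldl_append]

theorem bloque_concat (p : String) (ms : List (List (String × String)))
    (j : List (String × String)) (a c : String) :
    bloque p (ms ++ [j]) a c = bloque p ms a c ++ linea j a c := by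
  simp [bloque, join_concat, String.append_assoc]

-- loop invariant: after any nonempty prefix, A's (posicion, texto) state is the key of B's
-- last group and the rendering of B's groups so far
theorem invar (a b c : String) (y : List (String × String)) (ys : List (List (String × String))) :
    ∃ grs p ms,
      (y :: ys).foldl (pasoB b) [] = grs ++ [(p, ms)] ∧
      (y :: ys).foldl (pasoA a b c) (pvLookup y b, "\n" ++ pvLookup y b ++ ":")
        = (p, "\n" ++ joinSep "\n\n"
            ((grs ++ [(p, ms)]).map (fun g => bloque g.1 g.2 a c))) := by
  induction ys using List.reverseRecOn with
  | nil =>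
    refine ⟨[], pvLookup y b, [y], ?_, ?_⟩
    · rfl
    · simp [pasoA, bloque, linea, joinSep_singleton, String.join, String.append_assoc,
        String.empty_append]
      rw [show (":\n" : String) = ":" ++ "\n" from rfl, String.append_assoc]
  | append_singleton zs z ih =>
    obtain ⟨grs, p, ms, hg, hf⟩ := ih
    rw [show y :: (zs ++ [z]) = (y :: zs) ++ [z] by rfl] at *
    rw [List.foldl_append, List.foldl_append, hg, hf]
    simp only [List.foldl_cons, List.foldl_nil]
    by_cases hp : p == pvLookup z b
    · refine ⟨grs, p, ms ++ [z], ?_, ?_⟩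
      · simp [pasoB, hp]
      · have : (grs ++ [(p, ms ++ [z])]).map (fun g => bloque g.1 g.2 a c)
            = grs.map (fun g => bloque g.1 g.2 a c) ++ [bloque p ms a c ++ linea z a c] := by
          simp [bloque_concat]
        rw [this, joinSep_concat_append]
        simp [pasoA, hp, linea, String.append_assoc]
    · refine ⟨grs ++ [(p, ms)], pvLookup z b, [z], ?_, ?_⟩
      · simp [pasoB, hp]
      · have h1 : ((grs ++ [(p, ms)]) ++ [(pvLookup z b, [z])]).map (fun g => bloque g.1 g.2 a c)
            = (grs ++ [(p, ms)]).map (fun g => bloque g.1 g.2 a c)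
              ++ [bloque (pvLookup z b) [z] a c] := by simp
        rw [show grs ++ [(p, ms)] ++ [(pvLookup z b, [z])]
              = (grs ++ [(p, ms)]) ++ [(pvLookup z b, [z])] from rfl, h1,
          joinSep_concat _ _ _ (by simp)]
        simp [pasoA, hp, bloque, linea, String.join, String.append_assoc, String.empty_append]
        rw [show (":\n" : String) = ":" ++ "\n" from rfl, String.append_assoc]

-- ===== VERDICT (by name: the statement is the Claim_ definition above) =====
theorem mostrar_posicion_spec : Claim_equal_mostrar_posicion := by
  intro lista a b c _ hpre
  obtain ⟨hne, -⟩ := hpre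
  unfold Spec_mostrar_posicion
  cases lista with
  | nil => exact absurd rfl hne
  | cons y ys =>
    obtain ⟨grs, p, ms, hg, hf⟩ := invar a b c y ys
    simp only [mostrar_posicion, mostrar_posicion_alt, hg, hf]
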